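-- pv_equiv track=rewrite | github.com/AlainNL/chatsystem | back/app.py | validate_history
-- ===== SOURCE A (Python) =====
-- def validate_history(history):
--
--     # check if history is a list
--     if not isinstance(history, list):
--         return False
--
--     # if history is empty, done
--     if len(history) == 0:
--         return True
--
--     # expect alternating entre 'user' / 'agent'
--     expected_sender = 'user'
--
--     for message in history:
--
--         # Check that each message is a dictionary with 'sender' and 'message'.
--         if not isinstance(message, dict) or 'sender' not in message or 'message' not in message:
--             return False
--
--         # Check if key sender is correct
--         if message['sender'] not in ['user', 'agent']:
--             return False
--
--         # Check if message comes from the expected sender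
--         if message['sender'] != expected_sender:
--             return False
--
--         # Alternate the expected sender
--         expected_sender = 'agent' if expected_sender == 'user' else 'user'
--
--     return True
-- ===== SOURCE B (Python) =====
-- def validate_history(history):
--     if not isinstance(history, list):
--         return False
--     senders = []
--     for message in history:
--         if not isinstance(message, dict) or 'sender' not in message or 'message' not in message:
--             return False
--         senders.append(message['sender'])
--     expected = ['user' if i % 2 == 0 else 'agent' for i in range(len(senders))]
--     return senders == expected
-- ===== Notes on version B (the rewrite author's own statement) =====
-- stated objective: alternative
-- what changed: B collects all senders in one structural pass and then compares the list against the constructed alternating pattern ['user','agent',...], instead of A's stateful loop that toggles an expected_sender variable and early-returns on mismatch; the explicit sender-membership check disappears because the final list equality subsumes it.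
import Mathlib
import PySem

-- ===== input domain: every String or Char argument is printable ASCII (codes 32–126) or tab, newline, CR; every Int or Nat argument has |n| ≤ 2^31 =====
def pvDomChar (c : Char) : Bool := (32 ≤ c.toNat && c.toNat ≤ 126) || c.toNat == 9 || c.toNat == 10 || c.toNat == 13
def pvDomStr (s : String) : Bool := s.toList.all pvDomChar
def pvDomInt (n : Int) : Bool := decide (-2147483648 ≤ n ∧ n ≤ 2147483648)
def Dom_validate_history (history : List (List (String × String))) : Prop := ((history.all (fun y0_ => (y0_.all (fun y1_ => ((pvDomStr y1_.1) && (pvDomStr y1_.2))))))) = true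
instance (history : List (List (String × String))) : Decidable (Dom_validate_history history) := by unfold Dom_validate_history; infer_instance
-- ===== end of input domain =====

-- B collects all senders in one pass and compares against the constructed alternating
-- pattern, instead of A's stateful toggle loop with early returns (objective: alternative).


-- ===== PORT A =====
-- the loop over history, carrying the mutable expected_sender
def validate_history_loop : List (List (String × String)) → String → Bool
  | [], _ => true
  | message :: rest, expected_sender =>
    match (PySem.Dict.mk message).get? "sender", (PySem.Dict.mk message).get? "message" with
    | some s, some _ =>
      if ¬ (s = "user" ∨ s = "agent") then false
      else if s ≠ expected_sender then false
      else validate_history_loop rest (if expected_sender = "user" then "agent" else "user")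
    | _, _ => false

def validate_history (history : List (List (String × String))) : Bool :=
  if history.length = 0 then true
  else validate_history_loop history "user"

-- ===== PORT B =====
-- first pass: collect the sender of each message (none = some message lacks a key)
def validate_history_senders : List (List (String × String)) → Option (List String)
  | [] => some []
  | message :: rest =>
    match (PySem.Dict.mk message).get? "sender", (PySem.Dict.mk message).get? "message" with
    | some s, some _ => (validate_history_senders rest).map (s :: ·)
    | _, _ => none

def validate_history_alt (history : List (List (String × String))) : Bool :=
  match validate_history_senders history with
  | none => false
  | some senders =>
    senders == (List.range senders.length).map (fun i => if i % 2 = 0 then "user" else "agent")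

-- ===== PRECONDITION & SPEC =====
def Spec_validate_history (history : List (List (String × String))) (out : Bool) : Prop := out = validate_history_alt history
instance (history : List (List (String × String))) (out : Bool) : Decidable (Spec_validate_history history out) := by unfold Spec_validate_history; infer_instance

-- ===== CLAIM (what is proved, stated in full; the proofs are below) =====
def Claim_equal_validate_history : Prop := ∀ (history : List (List (String × String))), Dom_validate_history history → Spec_validate_history history (validate_history history)

-- ===== LEMMAS AND PROOFS =====

-- alternating pattern starting with "user" (b = true) or "agent" (b = false)
def pvPat : Bool → Nat → List String
  | _, 0 => []
  | b, n + 1 => (if b then "user" else "agent") :: pvPat (!b) n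

lemma pvPat_eq_range_map : ∀ n : Nat,
    pvPat true n = (List.range n).map (fun i => if i % 2 = 0 then "user" else "agent") ∧
    pvPat false n = (List.range n).map (fun i => if i % 2 = 0 then "agent" else "user") := by
  intro n
  induction n with
  | zero => exact ⟨rfl, rfl⟩
  | succ n ih =>
    rw [List.range_succ_eq_map]
    simp only [List.map_cons, List.map_map, pvPat]
    constructor
    · simp only [Bool.not_true, ih.2, List.cons.injEq, true_and]
      apply List.map_congr_left
      intro i _
      simp only [Function.comp]
      have : (i + 1) % 2 = 0 ↔ ¬ i % 2 = 0 := by omega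
      by_cases h : i % 2 = 0 <;> simp [h, this]
    · simp only [Bool.not_false, ih.1, List.cons.injEq]
      · constructor
        · simp
        · apply List.map_congr_left
          intro i _
          simp only [Function.comp]
          have : (i + 1) % 2 = 0 ↔ ¬ i % 2 = 0 := by omega
          by_cases h : i % 2 = 0 <;> simp [h, this]

lemma loop_eq_pat : ∀ (history : List (List (String × String))) (b : Bool),
    validate_history_loop history (if b then "user" else "agent") =
      (match validate_history_senders history with
       | none => false
       | some s => decide (s = pvPat b s.length)) := by
  intro history
  induction history with
  | nil => intro b; cases b <;> rfl
  | cons m rest ih =>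
    intro b
    simp only [validate_history_loop, validate_history_senders]
    cases hs : (PySem.Dict.mk m).get? "sender" with
    | none => simp
    | some s =>
      cases hm : (PySem.Dict.mk m).get? "message" with
      | none => simp
      | some mv =>
        simp only [Option.map]
        cases ht : validate_history_senders rest with
        | none =>
          have := ih (!b)
          rw [ht] at this
          by_cases h1 : s = "user" <;> by_cases h2 : s = "agent" <;>
            cases b <;> simp_all
        | some tl =>
          have := ih (!b)
          rw [ht] at this
          by_cases h1 : s = "user" <;> by_cases h2 : s = "agent" <;>
            cases b <;> simp_all [pvPat]

-- ===== VERDICT (by name: the statement is the Claim_ definition above) =====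
theorem validate_history_spec : Claim_equal_validate_history := by
  intro history _
  unfold Spec_validate_history validate_history validate_history_alt
  by_cases hemp : history.length = 0
  · have : history = [] := List.eq_nil_of_length_eq_zero hemp
    subst this
    simp [validate_history_senders]
  · rw [if_neg hemp]
    have h : validate_history_loop history "user" =
        (match validate_history_senders history with
         | none => false
         | some s => decide (s = pvPat true s.length)) := by
      simpa using loop_eq_pat history true
    rw [h]
    cases ht : validate_history_senders history with
    | none => rfl
    | some s =>
      simp only
      rw [(pvPat_eq_range_map s.length).1]
      exact (Bool.beq_eq_decide_eq _ _).symm
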